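-- pv_equiv track=rewrite | github.com/Alllex/homeworks71 | sem5/tocnf.py | rm_nonproductive
-- ===== SOURCE A (Python) =====
-- def is_nonterm(a): return a.istitle()
--
-- def rm_nonproductive(g):
--     found = True
--     prod = []
--     nonterms = list(set([r[0] for r in g]))
--     while found:
--         found = False
--         for nt in nonterms:
--             if not nt in prod:
--                 bodies = [r[1] for r in g if r[0] == nt]
--                 is_prod = True
--                 for b in bodies:
--                     nts = [a for a in b if is_nonterm(a)]
--                     for a in nts:
--                         if not a in prod:
--                             is_prod = False
--                             break
--                     if not is_prod: break
--                 if is_prod: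
--                     prod.append(nt)
--                     found = True
--     nonprod = [a for a in nonterms if not a in prod]
--     filtered = []
--     for r in g:
--         if not r[0] in nonprod:
--             nts = [a for a in r[1] if is_nonterm(a)]
--             is_prod = True
--             for nt in nts:
--                 if nt in nonprod:
--                     is_prod = False
--                     break
--             if is_prod: filtered.append(r)
--     return filtered
-- ===== SOURCE B (Python) =====
-- def rm_nonproductive(g):
--     # Precompute, in one pass over g, the set of nonterminal symbols each
--     # left-hand side needs (union over all of its bodies), then saturate the
--     # productive set with a worklist instead of rescanning the grammar.
--     need = {}
--     for lhs, body in g: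
--         req = need.setdefault(lhs, set())
--         for a in body:
--             if a.istitle():
--                 req.add(a)
--     prod = set()
--     pending = list(need)
--     progress = True
--     while progress:
--         progress = False
--         rest = []
--         for nt in pending:
--             if need[nt] <= prod:
--                 prod.add(nt)
--                 progress = True
--             else:
--                 rest.append(nt)
--         pending = rest
--     return [r for r in g if r[0] in prod
--             and all(a in prod for a in r[1] if a.istitle())]
-- ===== Notes on version B (the rewrite author's own statement) =====
-- stated objective: faster
-- what changed: B builds a lhs->required-nonterminals dictionary of sets in one pass over the grammar and saturates the productive set with a shrinking worklist and set membership, instead of A's repeated full rescans of the grammar with linear list-membership tests per nonterminal.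
import Mathlib
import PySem

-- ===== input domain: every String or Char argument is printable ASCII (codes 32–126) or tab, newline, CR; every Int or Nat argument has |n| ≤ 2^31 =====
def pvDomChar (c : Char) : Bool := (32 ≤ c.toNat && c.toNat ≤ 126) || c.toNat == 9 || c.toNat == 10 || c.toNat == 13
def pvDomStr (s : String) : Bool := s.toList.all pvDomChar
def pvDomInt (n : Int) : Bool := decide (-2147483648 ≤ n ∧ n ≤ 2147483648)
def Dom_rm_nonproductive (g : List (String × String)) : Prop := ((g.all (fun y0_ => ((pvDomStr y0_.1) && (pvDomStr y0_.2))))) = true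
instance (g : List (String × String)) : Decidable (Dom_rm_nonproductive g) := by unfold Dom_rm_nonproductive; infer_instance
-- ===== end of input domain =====

-- B precomputes each lhs's required-nonterminal set once and saturates the productive
-- set with a shrinking worklist, instead of A's repeated full grammar rescans with
-- list-membership tests (objective: faster).


-- ===== PORT A =====
-- Python's str.istitle() on the single characters it is applied to here is,
-- on the printable-ASCII domain, exactly "is an uppercase letter".
def is_nonterm (a : Char) : Bool := PySem.Chars.isupper a

-- the inner "is_prod" check of A: every body of nt has all its nonterminal
-- characters already in prod (the nested for-loops with break = List.all)
def condA (g : List (String × String)) (prod : List String) (nt : String) : Bool :=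
  ((g.filter (fun r => r.1 == nt)).map (fun r => r.2)).all
    (fun b => (b.toList.filter is_nonterm).all (fun a => prod.contains (String.mk [a])))

-- one "for nt in nonterms" pass of A's while-loop, state (prod, found)
def passA (g : List (String × String)) : List String → List String → Bool → List String × Bool
  | [], prod, found => (prod, found)
  | nt :: rest, prod, found =>
    if prod.contains nt then passA g rest prod found
    else if condA g prod nt then passA g rest (prod ++ [nt]) true
    else passA g rest prod found

-- "while found:" — fuel |nonterms|+1 always suffices: every repeated pass
-- strictly grows prod, and prod stays a nodup sublist of nonterms (proved below)
def loopA (g : List (String × String)) (nonterms : List String) : Nat → List String → List String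
  | 0, prod => prod
  | fuel+1, prod =>
    match passA g nonterms prod false with
    | (prod', true) => loopA g nonterms fuel prod'
    | (prod', false) => prod'

def rm_nonproductive (g : List (String × String)) : List (String × String) :=
  let nonterms := PySem.Set.ofList (g.map (fun r => r.1))
  let prod := loopA g nonterms (nonterms.length + 1) []
  let nonprod := nonterms.filter (fun a => !(prod.contains a))
  g.filter (fun r =>
    !(nonprod.contains r.1) &&
      (r.2.toList.filter is_nonterm).all (fun nt => !(nonprod.contains (String.mk [nt]))))

-- ===== PORT B =====
-- need[lhs] = set of nonterminal characters (as 1-char strings) over all bodies of lhs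
def buildNeed (g : List (String × String)) : PySem.Dict String (PySem.Set String) :=
  g.foldl (fun need r =>
    need.insert r.1
      (r.2.toList.foldl (fun s a => if is_nonterm a then PySem.Set.add s (String.mk [a]) else s)
        (need.getD r.1 PySem.Set.empty))) PySem.Dict.empty

-- one "for nt in pending" pass; Python's need[nt] never raises since pending ⊆ need.keys,
-- so getD with a default is exact here
def passB (need : PySem.Dict String (PySem.Set String)) :
    List String → PySem.Set String → Bool → List String → PySem.Set String × Bool × List String
  | [], prod, progress, rest => (prod, progress, rest)
  | nt :: tl, prod, progress, rest =>
    if PySem.Set.issubset (need.getD nt PySem.Set.empty) prod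
    then passB need tl (PySem.Set.add prod nt) true rest
    else passB need tl prod progress (rest ++ [nt])

-- "while progress:" — fuel |pending|+1 suffices: every repeated pass shrinks pending
def loopB (need : PySem.Dict String (PySem.Set String)) :
    Nat → List String → PySem.Set String → PySem.Set String
  | 0, _, prod => prod
  | fuel+1, pending, prod =>
    match passB need pending prod false [] with
    | (prod', true, rest) => loopB need fuel rest prod'
    | (prod', false, _) => prod'

def rm_nonproductive_alt (g : List (String × String)) : List (String × String) :=
  let need := buildNeed g
  let pending := need.keys
  let prod := loopB need (pending.length + 1) pending PySem.Set.empty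
  g.filter (fun r =>
    PySem.Set.contains prod r.1 &&
      (r.2.toList.filter is_nonterm).all (fun a => PySem.Set.contains prod (String.mk [a])))

-- ===== PRECONDITION & SPEC =====
def Spec_rm_nonproductive (g : List (String × String)) (out : List (String × String)) : Prop := out = rm_nonproductive_alt g
instance (g : List (String × String)) (out : List (String × String)) : Decidable (Spec_rm_nonproductive g out) := by unfold Spec_rm_nonproductive; infer_instance

-- ===== CLAIM (what is proved, stated in full; the proofs are below) =====
def Claim_equal_rm_nonproductive : Prop := ∀ (g : List (String × String)), Dom_rm_nonproductive g → Spec_rm_nonproductive g (rm_nonproductive g)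

-- ===== LEMMAS AND PROOFS =====

-- the common specification: the least set of productive nonterminals
inductive Productive (g : List (String × String)) : String → Prop
  | mk (nt : String) (h : nt ∈ g.map (fun r => r.1))
      (hc : ∀ r ∈ g, r.1 = nt → ∀ c ∈ r.2.toList, is_nonterm c = true →
              Productive g (String.mk [c])) :
      Productive g nt

theorem productive_closed {g : List (String × String)} {nt : String}
    (hp : Productive g nt) :
    ∀ r ∈ g, r.1 = nt → ∀ c ∈ r.2.toList, is_nonterm c = true → Productive g (String.mk [c]) := by
  cases hp with
  | mk _ h hc => exact hc

theorem condA_iff (g : List (String × String)) (prod : List String) (nt : String) :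
    condA g prod nt = true ↔
      ∀ r ∈ g, r.1 = nt → ∀ c ∈ r.2.toList, is_nonterm c = true → String.mk [c] ∈ prod := by
  simp only [condA, List.all_eq_true, List.mem_map, List.mem_filter, beq_iff_eq,
    List.contains_iff_mem]
  constructor
  · intro h r hr hnt c hc hu
    exact h r.2 ⟨r, ⟨hr, hnt⟩, rfl⟩ c ⟨hc, hu⟩
  · rintro h b ⟨r, ⟨hr, hnt⟩, rfl⟩ c ⟨hc1, hc2⟩
    exact h r hr hnt c hc1 hc2

theorem nodup_subset_length {l l' : List String} (h : l.Nodup) (hs : ∀ x ∈ l, x ∈ l') :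
    l.length ≤ l'.length := by
  calc l.length = l.toFinset.card := (List.toFinset_card_of_nodup h).symm
    _ ≤ l'.toFinset.card := Finset.card_le_card (fun x hx => by
        rw [List.mem_toFinset] at hx ⊢; exact hs x hx)
    _ ≤ l'.length := l'.toFinset_card_le

-- ---- A-side loop lemmas ----

theorem passA_cons_skip1 (g : List (String × String)) (nt : String) (tl : List String)
    (prod : List String) (found : Bool) (h : prod.contains nt = true) :
    passA g (nt :: tl) prod found = passA g tl prod found := by
  simp only [passA]
  rw [if_pos h]

theorem passA_cons_add (g : List (String × String)) (nt : String) (tl : List String)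
    (prod : List String) (found : Bool) (h : prod.contains nt = false)
    (h2 : condA g prod nt = true) :
    passA g (nt :: tl) prod found = passA g tl (prod ++ [nt]) true := by
  simp only [passA]
  rw [if_neg (Bool.eq_false_iff.mp h), if_pos h2]

theorem passA_cons_skip2 (g : List (String × String)) (nt : String) (tl : List String)
    (prod : List String) (found : Bool) (h : prod.contains nt = false)
    (h2 : condA g prod nt = false) :
    passA g (nt :: tl) prod found = passA g tl prod found := by
  simp only [passA]
  rw [if_neg (Bool.eq_false_iff.mp h), if_neg (Bool.eq_false_iff.mp h2)]

theorem passA_prefix (g : List (String × String)) :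
    ∀ (nts : List String) (prod : List String) (found : Bool),
      prod <+: (passA g nts prod found).1 := by
  intro nts
  induction nts with
  | nil => intro prod found; exact List.prefix_refl _
  | cons nt tl ih =>
    intro prod found
    simp only [passA]
    split
    · exact ih prod found
    · split
      · exact List.IsPrefix.trans ⟨[nt], rfl⟩ (ih (prod ++ [nt]) true)
      · exact ih prod found

theorem passA_found (g : List (String × String)) :
    ∀ (nts : List String) (prod : List String),
      (passA g nts prod true).2 = true := by
  intro nts
  induction nts with
  | nil => intro prod; rfl
  | cons nt tl ih =>
    intro prod
    simp only [passA]
    split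
    · exact ih prod
    · split
      · exact ih (prod ++ [nt])
      · exact ih prod

theorem passA_sound (g : List (String × String)) :
    ∀ (nts : List String) (prod : List String) (found : Bool),
      (∀ x ∈ prod, Productive g x) → (∀ x ∈ nts, x ∈ g.map (fun r => r.1)) →
      ∀ x ∈ (passA g nts prod found).1, Productive g x := by
  intro nts
  induction nts with
  | nil => intro prod found hs _ x hx; exact hs x hx
  | cons nt tl ih =>
    intro prod found hs hnts
    simp only [passA]
    split
    · exact ih prod found hs (fun x hx => hnts x (List.mem_cons_of_mem _ hx))
    · split
      · rename_i hcond
        refine ih (prod ++ [nt]) true ?_ (fun x hx => hnts x (List.mem_cons_of_mem _ hx))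
        intro x hx
        rcases List.mem_append.mp hx with h | h
        · exact hs x h
        · have hx' : x = nt := by simpa using h
          subst hx'
          exact Productive.mk x (hnts x List.mem_cons_self)
            (fun r hr hnt c hc hu => hs _ ((condA_iff g prod x).mp hcond r hr hnt c hc hu))
      · exact ih prod found hs (fun x hx => hnts x (List.mem_cons_of_mem _ hx))

theorem passA_nodup (g : List (String × String)) :
    ∀ (nts : List String) (prod : List String) (found : Bool),
      prod.Nodup → (passA g nts prod found).1.Nodup := by
  intro nts
  induction nts with
  | nil => intro prod found h; exact h
  | cons nt tl ih =>
    intro prod found h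
    simp only [passA]
    split
    · exact ih prod found h
    · split
      · rename_i hc _
        refine ih (prod ++ [nt]) true ?_
        have hnm : nt ∉ prod := by
          intro hmem
          simp [List.contains_iff_mem, hmem] at hc
        simp [List.nodup_append, h]
        exact fun a ha han => hnm (han ▸ ha)
      · exact ih prod found h

theorem passA_subset (g : List (String × String)) (S : List String) :
    ∀ (nts : List String) (prod : List String) (found : Bool),
      (∀ x ∈ prod, x ∈ S) → (∀ x ∈ nts, x ∈ S) →
      ∀ x ∈ (passA g nts prod found).1, x ∈ S := by
  intro nts
  induction nts with
  | nil => intro prod found hp _ x hx; exact hp x hx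
  | cons nt tl ih =>
    intro prod found hp hn
    simp only [passA]
    split
    · exact ih prod found hp (fun x hx => hn x (List.mem_cons_of_mem _ hx))
    · split
      · refine ih (prod ++ [nt]) true ?_ (fun x hx => hn x (List.mem_cons_of_mem _ hx))
        intro x hx
        rcases List.mem_append.mp hx with h | h
        · exact hp x h
        · have hx' : x = nt := by simpa using h
          subst hx'; exact hn x List.mem_cons_self
      · exact ih prod found hp (fun x hx => hn x (List.mem_cons_of_mem _ hx))

theorem passA_growth (g : List (String × String)) :
    ∀ (nts : List String) (prod : List String),
      (passA g nts prod false).2 = true → prod.length < (passA g nts prod false).1.length := by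
  intro nts
  induction nts with
  | nil => intro prod h; simp [passA] at h
  | cons nt tl ih =>
    intro prod h
    by_cases hcont : prod.contains nt = true
    · rw [passA_cons_skip1 g nt tl prod false hcont] at h ⊢
      exact ih prod h
    · have hcf : prod.contains nt = false := by simpa using hcont
      by_cases hcond : condA g prod nt = true
      · rw [passA_cons_add g nt tl prod false hcf hcond] at h ⊢
        have hlen := (passA_prefix g tl (prod ++ [nt]) true).length_le
        simp only [List.length_append, List.length_cons, List.length_nil] at hlen
        omega
      · have hc2 : condA g prod nt = false := by simpa using hcond
        rw [passA_cons_skip2 g nt tl prod false hcf hc2] at h ⊢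
        exact ih prod h

theorem passA_stable (g : List (String × String)) :
    ∀ (nts : List String) (prod : List String),
      (passA g nts prod false).2 = false →
      (passA g nts prod false).1 = prod ∧
        ∀ nt ∈ nts, nt ∉ prod → condA g prod nt = false := by
  intro nts
  induction nts with
  | nil => intro prod _; exact ⟨rfl, by simp⟩
  | cons nt tl ih =>
    intro prod h
    by_cases hcont : prod.contains nt = true
    · rw [passA_cons_skip1 g nt tl prod false hcont] at h ⊢
      rcases ih prod h with ⟨h1, h2⟩
      refine ⟨h1, ?_⟩
      intro x hx hnx
      rcases List.mem_cons.mp hx with rfl | hx'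
      · exact absurd (List.contains_iff_mem.mp hcont) hnx
      · exact h2 x hx' hnx
    · have hcf : prod.contains nt = false := by simpa using hcont
      by_cases hcond : condA g prod nt = true
      · rw [passA_cons_add g nt tl prod false hcf hcond] at h
        rw [passA_found] at h
        exact absurd h (by simp)
      · have hc2 : condA g prod nt = false := by simpa using hcond
        rw [passA_cons_skip2 g nt tl prod false hcf hc2] at h ⊢
        rcases ih prod h with ⟨h1, h2⟩
        refine ⟨h1, ?_⟩
        intro x hx hnx
        rcases List.mem_cons.mp hx with rfl | hx'
        · exact hc2
        · exact h2 x hx' hnx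

theorem loopA_sound (g : List (String × String)) (nonterms : List String)
    (hn : ∀ x ∈ nonterms, x ∈ g.map (fun r => r.1)) :
    ∀ (fuel : Nat) (prod : List String),
      (∀ x ∈ prod, Productive g x) →
      ∀ x ∈ loopA g nonterms fuel prod, Productive g x := by
  intro fuel
  induction fuel with
  | zero => intro prod hs x hx; exact hs x hx
  | succ fuel ih =>
    intro prod hs
    simp only [loopA]
    rcases hpass : passA g nonterms prod false with ⟨prod', f⟩
    have hsnd : ∀ x ∈ prod', Productive g x := by
      intro x hx
      have := passA_sound g nonterms prod false hs hn x
      rw [hpass] at this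
      exact this hx
    cases f
    · exact hsnd
    · exact ih prod' hsnd

theorem loopA_end (g : List (String × String)) (nonterms : List String) :
    ∀ (fuel : Nat) (prod : List String),
      prod.Nodup → (∀ x ∈ prod, x ∈ nonterms) →
      nonterms.length < fuel + prod.length →
      ∀ nt ∈ nonterms, nt ∉ loopA g nonterms fuel prod →
        condA g (loopA g nonterms fuel prod) nt = false := by
  intro fuel
  induction fuel with
  | zero =>
    intro prod hnd hsub hlen
    have := nodup_subset_length hnd hsub
    omega
  | succ fuel ih =>
    intro prod hnd hsub hlen
    simp only [loopA]
    rcases hpass : passA g nonterms prod false with ⟨prod', f⟩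
    cases f
    · rcases passA_stable g nonterms prod (by rw [hpass]) with ⟨h1, h2⟩
      rw [hpass] at h1
      simp only at h1
      subst h1
      exact fun nt hnt hmem => h2 nt hnt hmem
    · have hnd' : prod'.Nodup := by
        have := passA_nodup g nonterms prod false hnd
        rwa [hpass] at this
      have hsub' : ∀ x ∈ prod', x ∈ nonterms := by
        intro x hx
        have := passA_subset g nonterms nonterms prod false hsub (fun x hx => hx) x
        rw [hpass] at this
        exact this hx
      have hgr : prod.length < prod'.length := by
        have := passA_growth g nonterms prod (by rw [hpass])
        rwa [hpass] at this
      exact ih prod' hnd' hsub' (by omega)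

theorem productive_mem_of_closed (g : List (String × String)) (E : List String)
    (hcl : ∀ nt ∈ g.map (fun r => r.1), nt ∉ E → condA g E nt = false) :
    ∀ x, Productive g x → x ∈ E := by
  intro x hp
  induction hp with
  | mk nt h hc ih =>
    by_contra hx
    have hfalse := hcl nt h hx
    have : ¬ (∀ r ∈ g, r.1 = nt → ∀ c ∈ r.2.toList, is_nonterm c = true → String.mk [c] ∈ E) := by
      intro hall
      rw [(condA_iff g E nt).mpr hall] at hfalse
      exact absurd hfalse (by simp)
    push_neg at this
    rcases this with ⟨r, hr, hnt, c, hcmem, hu, hnmem⟩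
    exact hnmem (ih r hr hnt c hcmem hu)

theorem memA (g : List (String × String)) (x : String) :
    x ∈ loopA g (PySem.Set.ofList (g.map (fun r => r.1)))
        ((PySem.Set.ofList (g.map (fun r => r.1))).length + 1) [] ↔ Productive g x := by
  set nonterms := PySem.Set.ofList (g.map (fun r => r.1)) with hnts
  constructor
  · intro hx
    exact loopA_sound g nonterms
      (fun y hy => (PySem.Set.mem_ofList _ _).mp hy) (nonterms.length + 1) []
      (by simp) x hx
  · intro hp
    refine productive_mem_of_closed g _ ?_ x hp
    intro nt hnt hmem
    exact loopA_end g nonterms (nonterms.length + 1) [] (by simp) (by simp)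
      (by simp) nt ((PySem.Set.mem_ofList _ _).mpr hnt) hmem

-- ---- B-side: the need dictionary ----

theorem mem_charFold (cs : List Char) (s0 : PySem.Set String) (x : String) :
    x ∈ cs.foldl (fun s a => if is_nonterm a then PySem.Set.add s (String.mk [a]) else s) s0 ↔
      x ∈ s0 ∨ ∃ c ∈ cs, is_nonterm c = true ∧ x = String.mk [c] := by
  induction cs generalizing s0 with
  | nil => simp
  | cons c tl ih =>
    simp only [List.foldl_cons]
    by_cases h : is_nonterm c = true
    · rw [if_pos h, ih]
      simp only [PySem.Set.mem_add, List.mem_cons]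
      constructor
      · rintro (⟨h1 | h1⟩ | ⟨d, hd, h2, h3⟩)
        · exact Or.inl h1
        · exact Or.inr ⟨c, Or.inl rfl, h, h1⟩
        · exact Or.inr ⟨d, Or.inr hd, h2, h3⟩
      · rintro (h1 | ⟨d, hd | hd, h2, h3⟩)
        · exact Or.inl (Or.inl h1)
        · subst hd; exact Or.inl (Or.inr h3)
        · exact Or.inr ⟨d, hd, h2, h3⟩
    · rw [if_neg h, ih]
      constructor
      · rintro (h1 | ⟨d, hd, h2, h3⟩)
        · exact Or.inl h1
        · exact Or.inr ⟨d, List.mem_cons_of_mem _ hd, h2, h3⟩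
      · rintro (h1 | ⟨d, hd, h2, h3⟩)
        · exact Or.inl h1
        · rcases List.mem_cons.mp hd with rfl | hd'
          · exact absurd h2 h
          · exact Or.inr ⟨d, hd', h2, h3⟩

def reqProp (g : List (String × String)) (nt : String) (x : String) : Prop :=
  ∃ r ∈ g, r.1 = nt ∧ ∃ c ∈ r.2.toList, is_nonterm c = true ∧ x = String.mk [c]

theorem mem_buildNeedFrom (g : List (String × String)) :
    ∀ (d : PySem.Dict String (PySem.Set String)) (nt x : String),
      x ∈ (g.foldl (fun need r =>
          need.insert r.1
            (r.2.toList.foldl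
              (fun s a => if is_nonterm a then PySem.Set.add s (String.mk [a]) else s)
              (need.getD r.1 PySem.Set.empty))) d).getD nt PySem.Set.empty ↔
        x ∈ d.getD nt PySem.Set.empty ∨ reqProp g nt x := by
  induction g with
  | nil => intro d nt x; simp [reqProp]
  | cons r tl ih =>
    intro d nt x
    simp only [List.foldl_cons]
    rw [ih]
    by_cases h : r.1 = nt
    · rw [h, PySem.Dict.getD_insert_self, mem_charFold]
      simp only [reqProp, List.mem_cons]
      constructor
      · rintro ((h1 | ⟨c, hc, h2, h3⟩) | h1)
        · exact Or.inl h1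
        · exact Or.inr ⟨r, Or.inl rfl, h, c, hc, h2, h3⟩
        · rcases h1 with ⟨r', hr', h2, rest⟩
          exact Or.inr ⟨r', Or.inr hr', h2, rest⟩
      · rintro (h1 | ⟨r', hr' | hr', h2, rest⟩)
        · exact Or.inl (Or.inl h1)
        · subst hr'; exact Or.inl (Or.inr rest)
        · exact Or.inr ⟨r', hr', h2, rest⟩
    · rw [PySem.Dict.getD_insert_of_ne _ _ _ (fun he => h he.symm)]
      simp only [reqProp, List.mem_cons]
      constructor
      · rintro (h1 | ⟨r', hr', h2, rest⟩)
        · exact Or.inl h1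
        · exact Or.inr ⟨r', Or.inr hr', h2, rest⟩
      · rintro (h1 | ⟨r', hr' | hr', h2, rest⟩)
        · exact Or.inl h1
        · subst hr'; exact absurd h2 h
        · exact Or.inr ⟨r', hr', h2, rest⟩

theorem mem_need (g : List (String × String)) (nt x : String) :
    x ∈ (buildNeed g).getD nt PySem.Set.empty ↔ reqProp g nt x := by
  rw [buildNeed, mem_buildNeedFrom]
  simp [PySem.Dict.getD_empty, PySem.Set.empty]

theorem keys_need (g : List (String × String)) :
    (buildNeed g).keys = PySem.Set.ofList (g.map (fun r => r.1)) := by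
  rw [buildNeed]
  rw [PySem.Dict.keys_foldl_insert_key g (fun r => r.1)
    (fun need r => (r.2.toList.foldl
      (fun s a => if is_nonterm a then PySem.Set.add s (String.mk [a]) else s)
      (need.getD r.1 PySem.Set.empty))) PySem.Dict.empty]
  simp [PySem.Set.update_nil_left]

-- ---- B-side loop lemmas ----

theorem passB_cons_pos (need : PySem.Dict String (PySem.Set String)) (nt : String)
    (tl : List String) (prod : PySem.Set String) (prog : Bool) (rest : List String)
    (h : PySem.Set.issubset (need.getD nt PySem.Set.empty) prod = true) :
    passB need (nt :: tl) prod prog rest = passB need tl (PySem.Set.add prod nt) true rest := by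
  simp only [passB]
  rw [if_pos h]

theorem passB_cons_neg (need : PySem.Dict String (PySem.Set String)) (nt : String)
    (tl : List String) (prod : PySem.Set String) (prog : Bool) (rest : List String)
    (h : PySem.Set.issubset (need.getD nt PySem.Set.empty) prod = false) :
    passB need (nt :: tl) prod prog rest = passB need tl prod prog (rest ++ [nt]) := by
  simp only [passB]
  rw [if_neg (Bool.eq_false_iff.mp h)]

theorem passB_progress (need : PySem.Dict String (PySem.Set String)) :
    ∀ (pend : List String) (prod : PySem.Set String) (rest : List String),
      (passB need pend prod true rest).2.1 = true := by
  intro pend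
  induction pend with
  | nil => intro prod rest; rfl
  | cons nt tl ih =>
    intro prod rest
    simp only [passB]
    split
    · exact ih (PySem.Set.add prod nt) rest
    · exact ih prod (rest ++ [nt])

theorem passB_sound (g : List (String × String)) :
    ∀ (pend : List String) (prod : PySem.Set String) (prog : Bool) (rest : List String),
      (∀ x ∈ prod, Productive g x) → (∀ x ∈ pend, x ∈ g.map (fun r => r.1)) →
      ∀ x ∈ (passB (buildNeed g) pend prod prog rest).1, Productive g x := by
  intro pend
  induction pend with
  | nil => intro prod prog rest hs _ x hx; exact hs x hx
  | cons nt tl ih =>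
    intro prod prog rest hs hp
    simp only [passB]
    split
    · rename_i hsub
      refine ih (PySem.Set.add prod nt) true rest ?_
        (fun x hx => hp x (List.mem_cons_of_mem _ hx))
      intro x hx
      rcases (PySem.Set.mem_add prod nt x).mp hx with h | h
      · exact hs x h
      · subst h
        refine Productive.mk x (hp x List.mem_cons_self) ?_
        intro r hr hnt c hc hu
        have hmem : String.mk [c] ∈ (buildNeed g).getD x PySem.Set.empty :=
          (mem_need g x _).mpr ⟨r, hr, hnt, c, hc, hu, rfl⟩
        exact hs _ ((PySem.Set.issubset_iff _ _).mp hsub _ hmem)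
    · exact ih prod prog (rest ++ [nt]) hs (fun x hx => hp x (List.mem_cons_of_mem _ hx))

theorem passB_cover (need : PySem.Dict String (PySem.Set String)) :
    ∀ (pend : List String) (prod : PySem.Set String) (prog : Bool) (rest : List String) (x : String),
      (x ∈ pend ∨ x ∈ prod ∨ x ∈ rest) →
      x ∈ (passB need pend prod prog rest).1 ∨ x ∈ (passB need pend prod prog rest).2.2 := by
  intro pend
  induction pend with
  | nil =>
    intro prod prog rest x hx
    simpa [passB] using hx.resolve_left (by simp)
  | cons nt tl ih =>
    intro prod prog rest x hx
    simp only [passB]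
    split
    · refine ih (PySem.Set.add prod nt) true rest x ?_
      rcases hx with hx | hx | hx
      · rcases List.mem_cons.mp hx with rfl | hx'
        · exact Or.inr (Or.inl ((PySem.Set.mem_add prod x x).mpr (Or.inr rfl)))
        · exact Or.inl hx'
      · exact Or.inr (Or.inl ((PySem.Set.mem_add prod nt x).mpr (Or.inl hx)))
      · exact Or.inr (Or.inr hx)
    · refine ih prod prog (rest ++ [nt]) x ?_
      rcases hx with hx | hx | hx
      · rcases List.mem_cons.mp hx with rfl | hx'
        · exact Or.inr (Or.inr (by simp))
        · exact Or.inl hx'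
      · exact Or.inr (Or.inl hx)
      · exact Or.inr (Or.inr (List.mem_append_left _ hx))

theorem passB_rest_sub (need : PySem.Dict String (PySem.Set String)) :
    ∀ (pend : List String) (prod : PySem.Set String) (prog : Bool) (rest : List String),
      ∀ x ∈ (passB need pend prod prog rest).2.2, x ∈ rest ∨ x ∈ pend := by
  intro pend
  induction pend with
  | nil => intro prod prog rest x hx; exact Or.inl (by simpa [passB] using hx)
  | cons nt tl ih =>
    intro prod prog rest x hx
    simp only [passB] at hx
    split at hx
    · rcases ih (PySem.Set.add prod nt) true rest x hx with h | h
      · exact Or.inl h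
      · exact Or.inr (List.mem_cons_of_mem _ h)
    · rcases ih prod prog (rest ++ [nt]) x hx with h | h
      · rcases List.mem_append.mp h with h' | h'
        · exact Or.inl h'
        · exact Or.inr (List.mem_cons.mpr (Or.inl (by simpa using h')))
      · exact Or.inr (List.mem_cons_of_mem _ h)

theorem passB_stable (need : PySem.Dict String (PySem.Set String)) :
    ∀ (pend : List String) (prod : PySem.Set String) (rest : List String),
      (passB need pend prod false rest).2.1 = false →
      (passB need pend prod false rest).1 = prod ∧
        ∀ nt ∈ pend, PySem.Set.issubset (need.getD nt PySem.Set.empty) prod = false := by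
  intro pend
  induction pend with
  | nil => intro prod rest _; exact ⟨rfl, by simp⟩
  | cons nt tl ih =>
    intro prod rest h
    by_cases hsub : PySem.Set.issubset (need.getD nt PySem.Set.empty) prod = true
    · rw [passB_cons_pos need nt tl prod false rest hsub] at h
      rw [passB_progress] at h
      exact absurd h (by simp)
    · have hsf : PySem.Set.issubset (need.getD nt PySem.Set.empty) prod = false :=
        Bool.eq_false_iff.mpr hsub
      rw [passB_cons_neg need nt tl prod false rest hsf] at h ⊢
      rcases ih prod (rest ++ [nt]) h with ⟨h1, h2⟩
      refine ⟨h1, ?_⟩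
      intro x hx
      rcases List.mem_cons.mp hx with rfl | hx'
      · exact hsf
      · exact h2 x hx'

theorem passB_rest_len (need : PySem.Dict String (PySem.Set String)) :
    ∀ (pend : List String) (prod : PySem.Set String) (prog : Bool) (rest : List String),
      ((passB need pend prod prog rest).2.2).length ≤ rest.length + pend.length := by
  intro pend
  induction pend with
  | nil => intro prod prog rest; simp [passB]
  | cons nt tl ih =>
    intro prod prog rest
    by_cases hsub : PySem.Set.issubset (need.getD nt PySem.Set.empty) prod = true
    · rw [passB_cons_pos need nt tl prod prog rest hsub]
      have := ih (PySem.Set.add prod nt) true rest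
      simp only [List.length_cons]
      omega
    · have hsf : PySem.Set.issubset (need.getD nt PySem.Set.empty) prod = false :=
        Bool.eq_false_iff.mpr hsub
      rw [passB_cons_neg need nt tl prod prog rest hsf]
      have := ih prod prog (rest ++ [nt])
      simp only [List.length_append, List.length_cons, List.length_nil] at this ⊢
      omega

theorem passB_shrink (need : PySem.Dict String (PySem.Set String)) :
    ∀ (pend : List String) (prod : PySem.Set String) (rest : List String),
      (passB need pend prod false rest).2.1 = true →
      ((passB need pend prod false rest).2.2).length < rest.length + pend.length := by
  intro pend
  induction pend with
  | nil => intro prod rest h; simp [passB] at h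
  | cons nt tl ih =>
    intro prod rest h
    by_cases hsub : PySem.Set.issubset (need.getD nt PySem.Set.empty) prod = true
    · rw [passB_cons_pos need nt tl prod false rest hsub] at h ⊢
      have := passB_rest_len need tl (PySem.Set.add prod nt) true rest
      simp only [List.length_cons]
      omega
    · have hsf : PySem.Set.issubset (need.getD nt PySem.Set.empty) prod = false :=
        Bool.eq_false_iff.mpr hsub
      rw [passB_cons_neg need nt tl prod false rest hsf] at h ⊢
      have := ih prod (rest ++ [nt]) h
      simp only [List.length_append, List.length_cons, List.length_nil] at this ⊢
      omega

theorem loopB_sound (g : List (String × String)) :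
    ∀ (fuel : Nat) (pending : List String) (prod : PySem.Set String),
      (∀ x ∈ prod, Productive g x) → (∀ x ∈ pending, x ∈ g.map (fun r => r.1)) →
      ∀ x ∈ loopB (buildNeed g) fuel pending prod, Productive g x := by
  intro fuel
  induction fuel with
  | zero => intro pending prod hs _ x hx; exact hs x hx
  | succ fuel ih =>
    intro pending prod hs hp
    simp only [loopB]
    rcases hpass : passB (buildNeed g) pending prod false [] with ⟨prod', f, rest⟩
    have hsnd : ∀ x ∈ prod', Productive g x := by
      intro x hx
      have := passB_sound g pending prod false [] hs hp x
      rw [hpass] at this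
      exact this hx
    cases f
    · exact hsnd
    · refine ih rest prod' hsnd ?_
      intro x hx
      have := passB_rest_sub (buildNeed g) pending prod false [] x
      rw [hpass] at this
      rcases this hx with h | h
      · exact absurd h (by simp)
      · exact hp x h

theorem loopB_end (need : PySem.Dict String (PySem.Set String)) (S : List String) :
    ∀ (fuel : Nat) (pending : List String) (prod : PySem.Set String),
      (∀ x ∈ S, x ∈ prod ∨ x ∈ pending) →
      pending.length < fuel →
      ∀ x ∈ S, x ∉ loopB need fuel pending prod →
        PySem.Set.issubset (need.getD x PySem.Set.empty) (loopB need fuel pending prod) = false := by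
  intro fuel
  induction fuel with
  | zero => intro pending prod _ hlen; omega
  | succ fuel ih =>
    intro pending prod hcov hlen
    simp only [loopB]
    rcases hpass : passB need pending prod false [] with ⟨prod', f, rest⟩
    cases f
    · rcases passB_stable need pending prod [] (by rw [hpass]) with ⟨h1, h2⟩
      rw [hpass] at h1
      simp only at h1
      subst h1
      intro x hx hmem
      rcases hcov x hx with h | h
      · exact absurd h hmem
      · exact h2 x h
    · have hcov' : ∀ x ∈ S, x ∈ prod' ∨ x ∈ rest := by
        intro x hx
        have := passB_cover need pending prod false [] x
        rw [hpass] at this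
        rcases hcov x hx with h | h
        · exact this (Or.inr (Or.inl h))
        · exact this (Or.inl h)
      have hlen' : rest.length < fuel := by
        have := passB_shrink need pending prod [] (by rw [hpass])
        rw [hpass] at this
        simp only [List.length_nil] at this
        omega
      exact ih rest prod' hcov' hlen'

theorem memB (g : List (String × String)) (x : String) :
    x ∈ loopB (buildNeed g) ((buildNeed g).keys.length + 1) (buildNeed g).keys PySem.Set.empty ↔
      Productive g x := by
  constructor
  · intro hx
    refine loopB_sound g _ _ _ (by simp [PySem.Set.empty]) ?_ x hx
    intro y hy
    rw [keys_need] at hy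
    exact (PySem.Set.mem_ofList _ _).mp hy
  · intro hp
    by_contra hx
    have hcl := loopB_end (buildNeed g) (g.map (fun r => r.1))
      ((buildNeed g).keys.length + 1) (buildNeed g).keys PySem.Set.empty
      (fun y hy => Or.inr (by rw [keys_need]; exact (PySem.Set.mem_ofList _ _).mpr hy))
      (by omega)
    -- x is Productive but not in the final set: contradiction via closedness
    revert hx
    suffices h : ∀ y, Productive g y →
        y ∈ loopB (buildNeed g) ((buildNeed g).keys.length + 1) (buildNeed g).keys PySem.Set.empty by
      intro hx; exact hx (h x hp)
    intro y hpy
    induction hpy with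
    | mk nt h hc ih =>
      by_contra hmem
      have hfalse := hcl nt h hmem
      have : ¬ ∀ z ∈ (buildNeed g).getD nt PySem.Set.empty,
          z ∈ loopB (buildNeed g) ((buildNeed g).keys.length + 1) (buildNeed g).keys PySem.Set.empty := by
        intro hall
        rw [(PySem.Set.issubset_iff _ _).mpr hall] at hfalse
        exact absurd hfalse (by simp)
      push_neg at this
      rcases this with ⟨z, hz, hznot⟩
      rcases (mem_need g nt z).mp hz with ⟨r, hr, hnt, c, hcmem, hu, rfl⟩
      exact hznot (ih r hr hnt c hcmem hu)

-- ---- the final filter predicates agree rule by rule ----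

theorem pred_eq (g : List (String × String)) (r : String × String) (hr : r ∈ g) :
    (let nonterms := PySem.Set.ofList (g.map (fun x => x.1))
     let prod := loopA g nonterms (nonterms.length + 1) []
     let nonprod := nonterms.filter (fun a => !(prod.contains a))
     (!(nonprod.contains r.1) &&
       (r.2.toList.filter is_nonterm).all (fun nt => !(nonprod.contains (String.mk [nt]))))) =
    (let need := buildNeed g
     let prod := loopB need (need.keys.length + 1) need.keys PySem.Set.empty
     (PySem.Set.contains prod r.1 &&
       (r.2.toList.filter is_nonterm).all (fun a => PySem.Set.contains prod (String.mk [a])))) := by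
  simp only
  set nonterms := PySem.Set.ofList (g.map (fun x => x.1)) with hnonterms
  set EA := loopA g nonterms (nonterms.length + 1) [] with hEA
  set EB := loopB (buildNeed g) ((buildNeed g).keys.length + 1) (buildNeed g).keys PySem.Set.empty
    with hEB
  have hfst : r.1 ∈ g.map (fun x => x.1) := List.mem_map_of_mem hr
  have hfst' : r.1 ∈ nonterms := (PySem.Set.mem_ofList _ _).mpr hfst
  by_cases hp : Productive g r.1
  · have hA : r.1 ∈ EA := (memA g r.1).mpr hp
    have hB : r.1 ∈ EB := (memB g r.1).mpr hp
    have h1 : (!((nonterms.filter (fun a => !(EA.contains a))).contains r.1)) = true := by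
      simp [List.contains_iff_mem, List.mem_filter, hA]
    have h2 : PySem.Set.contains EB r.1 = true := by
      simp [PySem.Set.contains_iff, hB]
    rw [h1, h2, Bool.true_and, Bool.true_and]
    have hcl := productive_closed hp r hr rfl
    have h3 : ∀ c ∈ r.2.toList.filter is_nonterm, Productive g (String.mk [c]) := by
      intro c hc
      have := List.mem_filter.mp hc
      exact hcl c this.1 this.2
    have hallA : ((r.2.toList.filter is_nonterm).all
        (fun nt => !((nonterms.filter (fun a => !(EA.contains a))).contains (String.mk [nt])))) = true := by
      rw [List.all_eq_true]
      intro c hc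
      simp [List.contains_iff_mem, List.mem_filter]
      exact Or.inr ((memA g _).mpr (h3 c hc))
    have hallB : ((r.2.toList.filter is_nonterm).all
        (fun a => PySem.Set.contains EB (String.mk [a]))) = true := by
      rw [List.all_eq_true]
      intro c hc
      exact (PySem.Set.contains_iff _ _).mpr ((memB g _).mpr (h3 c hc))
    rw [hallA, hallB]
  · have hA : r.1 ∉ EA := fun h => hp ((memA g r.1).mp h)
    have hB : r.1 ∉ EB := fun h => hp ((memB g r.1).mp h)
    have h1 : (!((nonterms.filter (fun a => !(EA.contains a))).contains r.1)) = false := by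
      simp [List.contains_iff_mem, List.mem_filter, hA, hfst']
    have h2 : PySem.Set.contains EB r.1 = false := by
      simp [PySem.Set.contains_iff, hB]
    rw [h1, h2, Bool.false_and, Bool.false_and]

-- ===== VERDICT (by name: the statement is the Claim_ definition above) =====
theorem rm_nonproductive_spec : Claim_equal_rm_nonproductive := by
  intro g _
  unfold Spec_rm_nonproductive rm_nonproductive rm_nonproductive_alt
  simp only
  refine List.filter_congr ?_
  intro r hr
  exact pred_eq g r hr
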